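-- pv_equiv track=rewrite | github.com/davshus/stringart | artboard.py | circular_range
-- ===== SOURCE A (Python) =====
-- def circular_range(start, stop, modulo, step=1): # Only supports step of 1 or -1
--     start = start % modulo
--     stop = stop % modulo
--     index = start
--     step = -1 if step < 0 else 1
--     while index != stop:
--         yield index
--         index = (index + step) % modulo
-- ===== SOURCE B (Python) =====
-- def circular_range(start, stop, modulo, step=1): # Only supports step of 1 or -1
--     sgn = -1 if step < 0 else 1
--     count = ((stop - start) * sgn) % abs(modulo)
--     for i in range(count):
--         yield (start + sgn * i) % modulo
-- ===== Notes on version B (the rewrite author's own statement) =====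
-- stated objective: simpler
-- what changed: Replaces A's step-until-equal while loop over successive residues by a closed-form element count ((stop-start)*sgn) % abs(modulo) and a direct range map producing (start+sgn*i) % modulo.
import Mathlib
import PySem

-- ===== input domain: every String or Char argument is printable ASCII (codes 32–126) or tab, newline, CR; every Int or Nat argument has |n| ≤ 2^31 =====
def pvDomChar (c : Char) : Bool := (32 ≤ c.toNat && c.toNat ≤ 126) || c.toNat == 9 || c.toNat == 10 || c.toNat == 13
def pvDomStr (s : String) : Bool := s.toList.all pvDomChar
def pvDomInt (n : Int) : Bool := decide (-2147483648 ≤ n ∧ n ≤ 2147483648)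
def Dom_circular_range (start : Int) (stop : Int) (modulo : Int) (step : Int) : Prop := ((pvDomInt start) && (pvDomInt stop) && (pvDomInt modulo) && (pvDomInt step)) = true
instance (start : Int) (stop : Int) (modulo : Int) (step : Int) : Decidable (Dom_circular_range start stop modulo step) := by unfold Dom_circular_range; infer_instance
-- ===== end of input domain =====

-- B replaces A's step-until-equal while loop by a closed-form count and a direct range map (simpler; same cost).
-- Both Pythons are generators; the ports model the fully materialised sequence.

-- ===== PORT A =====
-- the while loop; the fuel argument only makes the recursion total (|modulo| always suffices on Pre_)
def circularLoop (stop m s : Int) : Nat → Int → List Int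
  | 0, _ => []
  | Nat.succ fuel, index =>
    if index ≠ stop then
      index :: circularLoop stop m s fuel (PySem.Int.mod (index + s) m)
    else []

def circular_range (start : Int) (stop : Int) (modulo : Int) (step : Int) : List Int :=
  let start' := PySem.Int.mod start modulo
  let stop'  := PySem.Int.mod stop modulo
  let step'  : Int := if step < 0 then -1 else 1
  circularLoop stop' modulo step' modulo.natAbs start'

-- ===== PORT B =====
def circular_range_alt (start : Int) (stop : Int) (modulo : Int) (step : Int) : List Int :=
  let sgn : Int := if step < 0 then -1 else 1
  let count := PySem.Int.mod ((stop - start) * sgn) (modulo.natAbs : Int)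
  (List.range count.toNat).map (fun (i : Nat) => PySem.Int.mod (start + sgn * (i : Int)) modulo)

-- ===== PRECONDITION & SPEC =====
-- Pre_ excludes exactly modulo = 0, where the Python A raises ZeroDivisionError on first iteration.
def Pre_circular_range (start : Int) (stop : Int) (modulo : Int) (step : Int) : Prop := modulo ≠ 0
instance (start : Int) (stop : Int) (modulo : Int) (step : Int) : Decidable (Pre_circular_range start stop modulo step) := by unfold Pre_circular_range; infer_instance
def pvWitness_circular_range : Int × Int × Int × Int := (2, 9, 5, 1)
def Spec_circular_range (start : Int) (stop : Int) (modulo : Int) (step : Int) (out : List Int) : Prop := out = circular_range_alt start stop modulo step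
instance (start : Int) (stop : Int) (modulo : Int) (step : Int) (out : List Int) : Decidable (Spec_circular_range start stop modulo step out) := by unfold Spec_circular_range; infer_instance

-- ===== CLAIM (what is proved, stated in full; the proofs are below) =====
def Claim_equal_circular_range : Prop := ∀ (start : Int) (stop : Int) (modulo : Int) (step : Int), Dom_circular_range start stop modulo step → Pre_circular_range start stop modulo step → Spec_circular_range start stop modulo step (circular_range start stop modulo step)

-- ===== LEMMAS AND PROOFS =====

-- Python mod value class: m divides x - x % m
lemma pymod_sub_dvd (x m : Int) : m ∣ (x - PySem.Int.mod x m) := by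
  refine ⟨PySem.Int.floordiv x m, ?_⟩
  have h := PySem.Int.floordiv_mul_add_mod x m
  linarith [h]

-- congruent arguments give the same Python mod
lemma pymod_congr {m : Int} (hm : m ≠ 0) {x y : Int} (h : m ∣ (x - y)) :
    PySem.Int.mod x m = PySem.Int.mod y m := by
  have hx := pymod_sub_dvd x m
  have hy := pymod_sub_dvd y m
  have hd : m ∣ (PySem.Int.mod x m - PySem.Int.mod y m) := by
    have : PySem.Int.mod x m - PySem.Int.mod y m
        = (x - y) - (x - PySem.Int.mod x m) + (y - PySem.Int.mod y m) := by ring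
    rw [this]
    exact dvd_add (dvd_sub h hx) hy
  have habs : |PySem.Int.mod x m - PySem.Int.mod y m| < |m| := by
    rcases lt_or_gt_of_ne hm with hneg | hpos
    · have b1 := PySem.Int.mod_neg_bounds (a := x) hneg
      have b2 := PySem.Int.mod_neg_bounds (a := y) hneg
      rw [abs_of_neg hneg]
      exact abs_lt.mpr ⟨by linarith [b1.1, b2.2], by linarith [b1.2, b2.1]⟩
    · have b1l := PySem.Int.mod_nonneg (a := x) hpos
      have b1u := PySem.Int.mod_lt (a := x) hpos
      have b2l := PySem.Int.mod_nonneg (a := y) hpos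
      have b2u := PySem.Int.mod_lt (a := y) hpos
      rw [abs_of_pos hpos]
      exact abs_lt.mpr ⟨by linarith, by linarith⟩
  have hz := Int.eq_zero_of_abs_lt_dvd ((abs_dvd _ _).mpr hd) habs
  linarith

lemma pymod_idem {m : Int} (hm : m ≠ 0) (x : Int) :
    PySem.Int.mod (PySem.Int.mod x m) m = PySem.Int.mod x m := by
  have h := pymod_sub_dvd x m
  exact pymod_congr hm (dvd_sub_comm.mp h)

lemma loop_eq (m s b : Int) (hm : m ≠ 0) (hs : s = 1 ∨ s = -1)
    (hb : PySem.Int.mod b m = b) :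
    ∀ (c : Nat) (index : Int) (fuel : Nat),
      PySem.Int.mod index m = index →
      ((b - index) * s)% (m.natAbs : Int) = (c : Int) →
      c ≤ fuel →
      circularLoop b m s fuel index
        = (List.range c).map (fun (i : Nat) => PySem.Int.mod (index + s * (i : Int)) m) := by
  have hM : (0 : Int) < (m.natAbs : Int) := by
    have := Int.natAbs_pos.mpr hm; exact_mod_cast this
  have hMm : ((m.natAbs : Int)) ∣ m := Int.natAbs_dvd.mpr dvd_rfl
  intro c
  induction c with
  | zero =>
    intro index fuel hi hc _
    have hdvdM : ((m.natAbs : Int)) ∣ (b - index) * s := by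
      exact Int.dvd_of_emod_eq_zero (by exact_mod_cast hc)
    have hdvd : m ∣ (b - index) := by
      rcases hs with h | h <;> subst h <;>
        [skip; rw [mul_neg_one] at hdvdM] <;>
        [rw [mul_one] at hdvdM; replace hdvdM := (dvd_neg).mp hdvdM] <;>
        exact (Int.natAbs_dvd).mp hdvdM
    have heq : index = b := by
      have := pymod_congr hm (dvd_sub_comm.mp hdvd)
      rw [hi, hb] at this; exact this
    subst heq
    cases fuel <;> simp [circularLoop]
  | succ c ih =>
    intro index fuel hi hc hf
    cases fuel with
    | zero => omega
    | succ f =>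
      have hne : index ≠ b := by
        intro h
        rw [h] at hc
        simp only [sub_self, zero_mul, Int.zero_emod] at hc
        omega
      have hbound : ((b - index) * s)% (m.natAbs : Int) < (m.natAbs : Int) :=
        Int.emod_lt_of_pos _ hM
      have hcM : ((c : Int) + 1) < (m.natAbs : Int) := by
        rw [hc] at hbound; push_cast at hbound ⊢; omega
      set i' := PySem.Int.mod (index + s) m with hi'def
      have hi'c : PySem.Int.mod i' m = i' := pymod_idem hm _
      obtain ⟨k, hk⟩ := pymod_sub_dvd (index + s) m
      have hss : s * s = 1 := by rcases hs with h | h <;> simp [h]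
      have hx : (b - i') * s = (b - index) * s - 1 + m * (k * s) := by
        linear_combination s * hk - hss
      have hmod1 : ((b - i') * s)% (m.natAbs : Int)
          = ((b - index) * s - 1)% (m.natAbs : Int) := by
        have hdd : ((m.natAbs : Int)) ∣ ((b - index) * s - 1) - (b - i') * s := by
          rw [hx]
          have : ((b - index) * s - 1) - ((b - index) * s - 1 + m * (k * s)) = -(m * (k * s)) := by
            ring
          rw [this]
          exact dvd_neg.mpr (hMm.mul_right (k * s))
        exact Int.modEq_iff_dvd.mpr hdd
      have hc' : ((b - i') * s)% (m.natAbs : Int) = (c : Int) := by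
        rw [hmod1]
        have h1 : ((b - index) * s - 1) % (m.natAbs : Int)
            = (((b - index) * s) % (m.natAbs : Int) - 1 % (m.natAbs : Int)) % (m.natAbs : Int) :=
          Int.sub_emod _ _ _
        have h2 : (1 : Int) % (m.natAbs : Int) = 1 := Int.emod_eq_of_lt (by omega) (by omega)
        rw [h1, h2, hc]
        have h3 : ((c + 1 : Nat) : Int) - 1 = (c : Int) := by push_cast; ring
        rw [h3]
        exact Int.emod_eq_of_lt (by positivity) (by omega)
      have htail := ih i' f hi'c hc' (by omega)
      have hstep : circularLoop b m s (f + 1) index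
          = index :: circularLoop b m s f i' := by
        simp [circularLoop, hne]
        rfl
      rw [hstep, htail, List.range_succ_eq_map, List.map_cons, List.map_map]
      congr 1
      · simp [hi]
      · refine List.map_congr_left ?_
        intro i _
        apply pymod_congr hm
        refine ⟨-k, ?_⟩
        push_cast
        linarith [hk]

-- ===== VERDICT (by name: the statement is the Claim_ definition above) =====
theorem circular_range_spec : Claim_equal_circular_range := by
  intro start stop modulo step _ hpre
  have hm : modulo ≠ 0 := hpre
  unfold Spec_circular_range
  simp only [circular_range, circular_range_alt]
  set s : Int := if step < 0 then -1 else 1 with hsdef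
  have hs : s = 1 ∨ s = -1 := by by_cases h : step < 0 <;> simp [hsdef, h]
  have hM : (0 : Int) < (modulo.natAbs : Int) := by
    have := Int.natAbs_pos.mpr hm; exact_mod_cast this
  set a := PySem.Int.mod start modulo with hadef
  set b := PySem.Int.mod stop modulo with hbdef
  have ha : PySem.Int.mod a modulo = a := pymod_idem hm _
  have hb : PySem.Int.mod b modulo = b := pymod_idem hm _
  set c0 := PySem.Int.mod ((stop - start) * s) (modulo.natAbs : Int) with hc0def
  have hc0 : c0 = ((stop - start) * s) % (modulo.natAbs : Int) := by
    rw [hc0def]; exact PySem.Int.mod_eq_emod_of_pos hM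
  have hc0nn : (0 : Int) ≤ c0 := by rw [hc0]; exact Int.emod_nonneg _ (by omega)
  have hc0lt : c0 < (modulo.natAbs : Int) := by rw [hc0]; exact Int.emod_lt_of_pos _ hM
  have hcast : ((c0.toNat : Nat) : Int) = c0 := Int.toNat_of_nonneg hc0nn
  have hcount : ((b - a) * s) % (modulo.natAbs : Int) = (c0.toNat : Int) := by
    rw [hcast, hc0]
    have hdd : (modulo.natAbs : Int) ∣ ((stop - start) * s) - ((b - a) * s) := by
      have d1 := pymod_sub_dvd stop modulo
      have d2 := pymod_sub_dvd start modulo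
      have hre : ((stop - start) * s) - ((b - a) * s) = ((stop - b) - (start - a)) * s := by
        ring
      refine Int.natAbs_dvd.mpr ?_
      rw [hre]
      exact (dvd_sub d1 d2).mul_right s
    exact Int.modEq_iff_dvd.mpr hdd
  have hfuel : c0.toNat ≤ modulo.natAbs := by omega
  have hmain := loop_eq modulo s b hm hs hb c0.toNat a modulo.natAbs ha hcount hfuel
  rw [hmain]
  refine List.map_congr_left ?_
  intro i _
  apply pymod_congr hm
  have hd := pymod_sub_dvd start modulo
  have hre : (a + s * (i : Int)) - (start + s * (i : Int)) = -(start - a) := by ring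
  rw [hre]
  exact dvd_neg.mpr hd
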